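-- pv_equiv track=rewrite | github.com/jloutey-hash/geovac | geovac/level4_multichannel.py | _channel_list_extended
-- ===== SOURCE A (Python) =====
-- from typing import Tuple, List, Union, Callable, Optional
--
-- def _channel_list_extended(
--     l_max: int, m_max: int,
--     l_max_per_m: Union[dict, None] = None,
--     homonuclear: bool = True,
-- ) -> List[Tuple[int, int, int, int]]:
--     """
--     Build list of (l1, m1, l2, m2) channels with M = 0.
--
--     Constraints:
--     - m1 + m2 = 0 (total M = 0)
--     - l1 + l2 even (gerade symmetry) when homonuclear=True
--     - All l1+l2 parities when homonuclear=False
--     - |m1| <= l1, |m2| = |m1| <= l2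
--     - |m1| <= m_max
--
--     When m_max=0, returns [(l1, 0, l2, 0)] matching _channel_list order.
--
--     Parameters
--     ----------
--     l_max : int
--         Default maximum angular momentum per electron.
--     m_max : int
--         Maximum |m| per electron.
--     l_max_per_m : dict or None
--         Per-|m| angular momentum limit. E.g., {0: 4, 1: 3} uses l_max=4
--         for sigma (m=0) and l_max=3 for pi (|m|=1). If None, uses l_max
--         for all m values. This allows keeping the total channel count in a
--         regime where the single-channel adiabatic approximation is valid.
--     homonuclear : bool
--         If True, enforce l1+l2 even (gerade symmetry). Default True.
--
--     Returns list sorted by (l1+l2, l1, |m1|, m1).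
--     """
--     channels: List[Tuple[int, int, int, int]] = []
--     for l1 in range(l_max + 1):
--         for l2 in range(l_max + 1):
--             if homonuclear and (l1 + l2) % 2 != 0:
--                 continue
--             m_limit = min(l1, l2, m_max)
--             for m1 in range(-m_limit, m_limit + 1):
--                 m2 = -m1
--                 am = abs(m1)
--                 # Apply per-m angular momentum limit
--                 if l_max_per_m is not None and am in l_max_per_m:
--                     lm = l_max_per_m[am]
--                     if l1 > lm or l2 > lm:
--                         continue
--                 channels.append((l1, m1, l2, m2))
--     channels.sort(key=lambda x: (x[0] + x[2], x[0], abs(x[1]), x[1]))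
--     return channels
-- ===== SOURCE B (Python) =====
-- from typing import Tuple, List, Union, Iterator
--
-- def _m_order(m_limit: int) -> Iterator[Tuple[int, int]]:
--     """(m1, m2) pairs of one cell, m2 = -m1, in the final key order of m1:
--     0, -1, +1, ..., -m_limit, +m_limit."""
--     if m_limit >= 0:
--         yield 0, 0
--     for k in range(1, m_limit + 1):
--         yield -k, k
--         yield k, -k
--
-- def _keep(l_max_per_m: Union[dict, None], am: int, l1: int, l2: int) -> bool:
--     """The per-|m| angular-momentum limit: False iff l_max_per_m caps |m| below (l1, l2)."""
--     if l_max_per_m is not None and am in l_max_per_m: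
--         lm = l_max_per_m[am]
--         return l1 <= lm and l2 <= lm
--     return True
--
-- def _channel_list_extended(
--     l_max: int, m_max: int,
--     l_max_per_m: Union[dict, None] = None,
--     homonuclear: bool = True,
-- ) -> List[Tuple[int, int, int, int]]:
--     """Emit the channels directly in the final sorted order (l1+l2, l1, |m1|, m1):
--     iterate the total s = l1+l2 diagonally, then l1 (with l2 = s - l1), then m1 in
--     the key order given by _m_order.  The sort key is unique per tuple, so no final
--     sort is needed.  A dry-run pass first counts the channels, so the output list
--     is allocated once and filled by index instead of growing append by append."""
--     # pass 1: dry run, count the channels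
--     n = 0
--     for s in range(2 * l_max + 1):
--         if homonuclear and s % 2 != 0:
--             continue
--         for l1 in range(l_max + 1):
--             l2 = s - l1
--             if l2 < 0 or l2 > l_max:
--                 continue
--             for m1, m2 in _m_order(min(l1, l2, m_max)):
--                 if _keep(l_max_per_m, abs(m1), l1, l2):
--                     n += 1
--     # pass 2: fill the preallocated list in final order
--     out: List[Tuple[int, int, int, int]] = [None] * n  # type: ignore[list-item]
--     i = 0
--     for s in range(2 * l_max + 1):
--         if homonuclear and s % 2 != 0:
--             continue
--         for l1 in range(l_max + 1):
--             l2 = s - l1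
--             if l2 < 0 or l2 > l_max:
--                 continue
--             for m1, m2 in _m_order(min(l1, l2, m_max)):
--                 if _keep(l_max_per_m, abs(m1), l1, l2):
--                     out[i] = (l1, m1, l2, m2)
--                     i += 1
--     return out
-- ===== Notes on version B (the rewrite author's own statement) =====
-- stated objective: alternative
-- what changed: Instead of enumerating all (l1,l2) pairs in row order, appending, and sorting the collected channels at the end, B iterates the total s=l1+l2 diagonally (parity-checked once per diagonal), then l1 with l2=s-l1, emitting m1 in the key order 0,-1,+1,-2,+2,... so the list comes out already sorted with no final sort; a dry-run pass counts the channels first and the output list is allocated once and filled by index instead of growing append by append.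
import Mathlib
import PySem

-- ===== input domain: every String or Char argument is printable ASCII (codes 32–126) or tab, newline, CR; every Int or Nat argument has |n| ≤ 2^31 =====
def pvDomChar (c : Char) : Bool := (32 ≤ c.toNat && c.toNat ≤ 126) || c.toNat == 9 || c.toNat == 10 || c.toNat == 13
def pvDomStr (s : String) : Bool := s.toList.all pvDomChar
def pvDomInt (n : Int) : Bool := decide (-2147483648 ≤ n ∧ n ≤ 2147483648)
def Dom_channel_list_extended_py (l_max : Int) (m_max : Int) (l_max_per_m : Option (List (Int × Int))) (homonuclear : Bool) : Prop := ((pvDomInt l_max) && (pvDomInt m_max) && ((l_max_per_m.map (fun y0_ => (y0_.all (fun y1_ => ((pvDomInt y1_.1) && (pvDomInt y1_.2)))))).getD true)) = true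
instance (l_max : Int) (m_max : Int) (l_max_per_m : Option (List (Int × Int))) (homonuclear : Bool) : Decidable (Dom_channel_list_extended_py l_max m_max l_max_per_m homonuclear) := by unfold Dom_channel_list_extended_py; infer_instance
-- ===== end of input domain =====

-- B emits the channels directly in the final (l1+l2, l1, |m1|, m1) order (diagonal total s, then l1,
-- then m1 as 0,-1,+1,…), so the trailing sort of A disappears; same filters, same returned list.

-- shared helper: the per-|m| angular-momentum guard ('am in l_max_per_m' + 'l1 > lm or l2 > lm');
-- dict lookup = first match in the association list, exact for Python dicts (unique keys)
def pvLmSkip (l_max_per_m : Option (List (Int × Int))) (am l1 l2 : Int) : Bool :=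
  match l_max_per_m with
  | none => false
  | some d =>
    match d.find? (fun kv => kv.1 == am) with
    | none => false
    | some kv => decide (l1 > kv.2) || decide (l2 > kv.2)

-- A's sort key (l1+l2, l1, |m1|, m1); Python compares int tuples lexicographically, which is
-- exactly the Lex order on nested pairs
def pvKey (x : Int × Int × Int × Int) : Lex (Int × Lex (Int × Lex (Int × Int))) :=
  toLex (x.1 + x.2.2.1, toLex (x.1, toLex (|x.2.1|, x.2.1)))

-- ===== PORT A =====
def channel_list_extended_py (l_max : Int) (m_max : Int) (l_max_per_m : Option (List (Int × Int))) (homonuclear : Bool) : List (Int × Int × Int × Int) :=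
  PySem.List.sorted
    ((PySem.List.pyRange 0 (l_max + 1)).foldl (fun acc l1 =>
      (PySem.List.pyRange 0 (l_max + 1)).foldl (fun acc l2 =>
        if homonuclear && (PySem.Int.mod (l1 + l2) 2 != 0) then acc
        else
          (PySem.List.pyRange (-(min (min l1 l2) m_max)) (min (min l1 l2) m_max + 1)).foldl
            (fun acc m1 =>
              if pvLmSkip l_max_per_m |m1| l1 l2 then acc
              else acc ++ [(l1, m1, l2, -m1)]) acc) acc) [])
    pvKey

-- ===== PORT B =====
-- port of B's helper _keep: the per-|m| angular-momentum guard (dict lookup = first match,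
-- exact for Python dicts, whose keys are unique)
def pvKeep (l_max_per_m : Option (List (Int × Int))) (am l1 l2 : Int) : Bool :=
  match l_max_per_m with
  | none => true
  | some d =>
    match d.find? (fun kv => kv.1 == am) with
    | none => true
    | some kv => decide (l1 ≤ kv.2) && decide (l2 ≤ kv.2)

-- port of B's generator _m_order as the list of its yields: (m1, -m1) pairs in key order
def pvMOrder (m_limit : Int) : List (Int × Int) :=
  (if 0 ≤ m_limit then [((0 : Int), (0 : Int))] else []) ++
    (PySem.List.pyRange 1 (m_limit + 1)).flatMap (fun k => [(-k, k), (k, -k)])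

-- B: dry-run count, then allocate once ([None] * n) and fill by index.  Every slot is
-- written exactly once (count and fill run the same loops), so Python's None placeholder
-- never appears in the result; the in-order, in-range assignment out[i] = t is List.set.
def channel_list_extended_py_alt (l_max : Int) (m_max : Int) (l_max_per_m : Option (List (Int × Int))) (homonuclear : Bool) : List (Int × Int × Int × Int) :=
  ((PySem.List.pyRange 0 (2 * l_max + 1)).foldl (fun st s =>
      if homonuclear && (PySem.Int.mod s 2 != 0) then st
      else (PySem.List.pyRange 0 (l_max + 1)).foldl (fun st l1 =>
        if s - l1 < 0 || s - l1 > l_max then st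
        else (pvMOrder (min (min l1 (s - l1)) m_max)).foldl (fun st mm =>
          if pvKeep l_max_per_m |mm.1| l1 (s - l1) then
            (st.1.set st.2.toNat (l1, mm.1, s - l1, mm.2), st.2 + 1)
          else st) st) st)
    (List.replicate
      ((PySem.List.pyRange 0 (2 * l_max + 1)).foldl (fun n s =>
          if homonuclear && (PySem.Int.mod s 2 != 0) then n
          else (PySem.List.pyRange 0 (l_max + 1)).foldl (fun n l1 =>
            if s - l1 < 0 || s - l1 > l_max then n
            else (pvMOrder (min (min l1 (s - l1)) m_max)).foldl (fun n mm =>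
              if pvKeep l_max_per_m |mm.1| l1 (s - l1) then n + 1 else n) n) n)
        (0 : Int)).toNat
      ((0, 0, 0, 0) : Int × Int × Int × Int),
     (0 : Int))).1

-- ===== PRECONDITION & SPEC =====
def Spec_channel_list_extended_py (l_max : Int) (m_max : Int) (l_max_per_m : Option (List (Int × Int))) (homonuclear : Bool) (out : List (Int × Int × Int × Int)) : Prop := out = channel_list_extended_py_alt l_max m_max l_max_per_m homonuclear
instance (l_max : Int) (m_max : Int) (l_max_per_m : Option (List (Int × Int))) (homonuclear : Bool) (out : List (Int × Int × Int × Int)) : Decidable (Spec_channel_list_extended_py l_max m_max l_max_per_m homonuclear out) := by unfold Spec_channel_list_extended_py; infer_instance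

-- ===== CLAIM (what is proved, stated in full; the proofs are below) =====
def Claim_equal_channel_list_extended_py : Prop := ∀ (l_max : Int) (m_max : Int) (l_max_per_m : Option (List (Int × Int))) (homonuclear : Bool), Dom_channel_list_extended_py l_max m_max l_max_per_m homonuclear → Spec_channel_list_extended_py l_max m_max l_max_per_m homonuclear (channel_list_extended_py l_max m_max l_max_per_m homonuclear)

-- ===== LEMMAS AND PROOFS =====

-- the filtered m-channel block for one (l1, l2) cell, over a given m1-candidate list
def pvCell (d : Option (List (Int × Int))) (l1 l2 : Int) (ms : List Int) : List (Int × Int × Int × Int) :=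
  (ms.filter (fun m1 => !(pvLmSkip d |m1| l1 l2))).map (fun m1 => (l1, m1, l2, -m1))

-- B's m1-candidate order 0, -1, 1, -2, 2, …
def pvMs (n : Int) : List Int :=
  (PySem.List.pyRange 0 (n + 1)).flatMap (fun k => if k == 0 then [(0 : Int)] else [-k, k])

-- one (l1, l2) cell as A produces it (including the parity guard), m1 in -mlim..mlim order
def pvF (d : Option (List (Int × Int))) (m_max : Int) (hn : Bool) (l1 l2 : Int) : List (Int × Int × Int × Int) :=
  if hn && (PySem.Int.mod (l1 + l2) 2 != 0) then []
  else pvCell d l1 l2 (PySem.List.pyRange (-(min (min l1 l2) m_max)) (min (min l1 l2) m_max + 1))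

-- the same cell with B's m1 order
def pvFB (d : Option (List (Int × Int))) (m_max : Int) (hn : Bool) (l1 l2 : Int) : List (Int × Int × Int × Int) :=
  if hn && (PySem.Int.mod (l1 + l2) 2 != 0) then []
  else pvCell d l1 l2 (pvMs (min (min l1 l2) m_max))

-- B's (s, l1) block with the range guard on l2 = s - l1
def pvG (l_max m_max : Int) (d : Option (List (Int × Int))) (hn : Bool) (s l1 : Int) : List (Int × Int × Int × Int) :=
  if s - l1 < 0 || s - l1 > l_max then [] else pvFB d m_max hn l1 (s - l1)

def pvRawA (l_max m_max : Int) (d : Option (List (Int × Int))) (hn : Bool) : List (Int × Int × Int × Int) :=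
  (PySem.List.pyRange 0 (l_max + 1)).flatMap (fun l1 =>
    (PySem.List.pyRange 0 (l_max + 1)).flatMap (fun l2 => pvF d m_max hn l1 l2))

def pvRawB (l_max m_max : Int) (d : Option (List (Int × Int))) (hn : Bool) : List (Int × Int × Int × Int) :=
  (PySem.List.pyRange 0 (2 * l_max + 1)).flatMap (fun s =>
    (PySem.List.pyRange 0 (l_max + 1)).flatMap (fun l1 => pvG l_max m_max d hn s l1))

-- loop-shape helpers
lemma pv_foldl_skip {α β : Type} (l : List α) (g : α → Bool) (f : α → β) (acc : List β) :
    l.foldl (fun acc x => if g x then acc else acc ++ [f x]) acc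
      = acc ++ (l.filter (fun x => !(g x))).map f := by
  rw [PySem.List.foldl_congr_mem l _ (fun acc x => if !(g x) then acc ++ [f x] else acc) acc
    (by intro acc x _; cases hg : g x <;> simp [hg])]
  exact PySem.List.foldl_append_if _ f l acc

lemma pv_foldl_block {α β : Type} (l : List α) (g : α → Bool) (X : α → List β) (acc : List β) :
    l.foldl (fun acc x => if g x then acc else acc ++ X x) acc
      = acc ++ l.flatMap (fun x => if g x then [] else X x) := by
  rw [PySem.List.foldl_congr_mem l _ (fun acc x => acc ++ (if g x then [] else X x)) acc
    (by intro acc x _; cases hg : g x <;> simp [hg])]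
  exact PySem.List.foldl_append_eq_flatMap _ l acc

lemma pv_flatMap_congr {α β : Type} {l : List α} {f g : α → List β}
    (h : ∀ x ∈ l, f x = g x) : l.flatMap f = l.flatMap g := by
  induction l with
  | nil => rfl
  | cons a t ih =>
    simp only [List.flatMap_cons]
    rw [h a (by simp), ih (fun x hx => h x (by simp [hx]))]

lemma pv_perm_flatMap {α β : Type} {l : List α} {f g : α → List β}
    (h : ∀ x ∈ l, (f x).Perm (g x)) : (l.flatMap f).Perm (l.flatMap g) := by
  induction l with
  | nil => simp
  | cons a t ih =>
    simp only [List.flatMap_cons]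
    exact (h a (by simp)).append (ih (fun x hx => h x (by simp [hx])))

-- normal forms of the two ports
lemma pvA_nf (l_max m_max : Int) (d : Option (List (Int × Int))) (hn : Bool) :
    channel_list_extended_py l_max m_max d hn
      = PySem.List.sorted (pvRawA l_max m_max d hn) pvKey := by
  unfold channel_list_extended_py pvRawA
  congr 1
  have hinner : ∀ (l1 l2 : Int) (acc : List (Int × Int × Int × Int)),
      (PySem.List.pyRange (-(min (min l1 l2) m_max)) (min (min l1 l2) m_max + 1)).foldl
        (fun acc m1 => if pvLmSkip d |m1| l1 l2 then acc else acc ++ [(l1, m1, l2, -m1)]) acc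
      = acc ++ pvCell d l1 l2
          (PySem.List.pyRange (-(min (min l1 l2) m_max)) (min (min l1 l2) m_max + 1)) := by
    intro l1 l2 acc
    rw [pv_foldl_skip]
    rfl
  have hmid : ∀ (l1 : Int) (acc : List (Int × Int × Int × Int)),
      (PySem.List.pyRange 0 (l_max + 1)).foldl (fun acc l2 =>
        if hn && (PySem.Int.mod (l1 + l2) 2 != 0) then acc
        else
          (PySem.List.pyRange (-(min (min l1 l2) m_max)) (min (min l1 l2) m_max + 1)).foldl
            (fun acc m1 =>
              if pvLmSkip d |m1| l1 l2 then acc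
              else acc ++ [(l1, m1, l2, -m1)]) acc) acc
      = acc ++ (PySem.List.pyRange 0 (l_max + 1)).flatMap (fun l2 => pvF d m_max hn l1 l2) := by
    intro l1 acc
    rw [PySem.List.foldl_congr_mem _ _ (fun acc l2 =>
      if hn && (PySem.Int.mod (l1 + l2) 2 != 0) then acc
      else acc ++ pvCell d l1 l2
        (PySem.List.pyRange (-(min (min l1 l2) m_max)) (min (min l1 l2) m_max + 1))) acc
      (by intro acc l2 _
          beta_reduce
          by_cases hc : (hn && (PySem.Int.mod (l1 + l2) 2 != 0)) = true
          · rw [if_pos hc, if_pos hc]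
          · rw [if_neg hc, if_neg hc]; exact hinner l1 l2 acc)]
    rw [pv_foldl_block]
    rfl
  rw [PySem.List.foldl_congr_mem _ _ (fun acc l1 =>
      acc ++ (PySem.List.pyRange 0 (l_max + 1)).flatMap (fun l2 => pvF d m_max hn l1 l2)) []
    (by intro acc l1 _; exact hmid l1 acc)]
  rw [PySem.List.foldl_append_eq_flatMap]
  simp

-- B-side loop-shape helpers, generic in the accumulator
lemma pv_fold_keep {α β γ : Type} (l : List α) (p : α → Bool) (f : α → β) (w : γ → β → γ) :
    ∀ st : γ, l.foldl (fun st x => if p x then w st (f x) else st) st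
      = ((l.filter p).map f).foldl w st := by
  induction l with
  | nil => intro st; rfl
  | cons a t ih =>
    intro st
    by_cases hp : p a = true <;> simp [hp, ih]

lemma pv_fold_blocks {α β γ : Type} (l : List α) (g : α → Bool) (X : α → List β) (w : γ → β → γ) :
    ∀ st : γ, l.foldl (fun st x => if g x then st else (X x).foldl w st) st
      = (l.flatMap (fun x => if g x then [] else X x)).foldl w st := by
  induction l with
  | nil => intro st; rfl
  | cons a t ih =>
    intro st
    by_cases hg : g a = true <;> simp [List.flatMap_cons, hg, ih, List.foldl_append]

lemma pv_foldl_add_one {α : Type} (l : List α) : ∀ a : Int,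
    l.foldl (fun n _ => n + 1) a = a + l.length := by
  induction l with
  | nil => intro a; simp
  | cons x t ih => intro a; simp [ih]; ring

lemma pvKeep_eq (d : Option (List (Int × Int))) (am l1 l2 : Int) :
    pvKeep d am l1 l2 = !(pvLmSkip d am l1 l2) := by
  unfold pvKeep pvLmSkip
  cases d with
  | none => rfl
  | some dd =>
    simp only []
    cases hf : dd.find? (fun kv => kv.1 == am) with
    | none => rfl
    | some kv =>
      by_cases h1 : l1 ≤ kv.2
      · by_cases h2 : l2 ≤ kv.2
        · simp [h1, h2, show ¬ l1 > kv.2 by omega, show ¬ l2 > kv.2 by omega]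
        · simp [h1, h2, show l2 > kv.2 by omega]
      · simp [h1, show l1 > kv.2 by omega]

lemma pvMOrder_eq (m : Int) : pvMOrder m = (pvMs m).map (fun x => (x, -x)) := by
  unfold pvMOrder pvMs
  rcases Int.lt_or_le m 0 with h | h
  · rw [if_neg (by omega), PySem.List.pyRange_one_eq_nil (by omega : m + 1 ≤ 0),
      PySem.List.pyRange_one_eq_nil (by omega : m + 1 ≤ 1)]
    simp
  · rw [if_pos h, PySem.List.pyRange_one_cons (by omega : (0 : Int) < m + 1)]
    simp only [List.flatMap_cons, List.map_append, List.map_flatMap]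
    rw [show ((0 : Int) + 1) = (1 : Int) by ring]
    have h0 : List.map (fun x : Int => (x, -x)) (if (0 : Int) == 0 then [(0 : Int)] else [-0, 0])
        = [((0 : Int), (0 : Int))] := by norm_num
    rw [h0]
    congr 1
    apply pv_flatMap_congr
    intro k hk
    have hk1 : ¬(k = 0) := by
      have := (PySem.List.mem_pyRange_one.mp hk).1; omega
    simp [hk1]

-- the common normal form of B's two passes (count and fill run the same loops)
lemma pvB_loop_nf {γ : Type} (l_max m_max : Int) (d : Option (List (Int × Int))) (hn : Bool)
    (w : γ → (Int × Int × Int × Int) → γ) (init : γ) :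
    (PySem.List.pyRange 0 (2 * l_max + 1)).foldl (fun st s =>
      if hn && (PySem.Int.mod s 2 != 0) then st
      else (PySem.List.pyRange 0 (l_max + 1)).foldl (fun st l1 =>
        if s - l1 < 0 || s - l1 > l_max then st
        else (pvMOrder (min (min l1 (s - l1)) m_max)).foldl (fun st mm =>
          if pvKeep d |mm.1| l1 (s - l1) then w st (l1, mm.1, s - l1, mm.2) else st) st) st) init
    = ((PySem.List.pyRange 0 (2 * l_max + 1)).flatMap (fun s =>
        if hn && (PySem.Int.mod s 2 != 0) then []
        else (PySem.List.pyRange 0 (l_max + 1)).flatMap (fun l1 =>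
          if s - l1 < 0 || s - l1 > l_max then []
          else pvCell d l1 (s - l1) (pvMs (min (min l1 (s - l1)) m_max))))).foldl w init := by
  have hcell : ∀ (s l1 : Int) (st : γ),
      (pvMOrder (min (min l1 (s - l1)) m_max)).foldl (fun st mm =>
        if pvKeep d |mm.1| l1 (s - l1) then w st (l1, mm.1, s - l1, mm.2) else st) st
      = (pvCell d l1 (s - l1) (pvMs (min (min l1 (s - l1)) m_max))).foldl w st := by
    intro s l1 st
    rw [pv_fold_keep _ _ (fun mm : Int × Int => (l1, mm.1, s - l1, mm.2)) w]
    congr 1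
    rw [pvMOrder_eq]
    unfold pvCell
    rw [List.filter_map, List.map_map]
    exact congrArg _ (List.filter_congr (fun m1 _ => by simp [pvKeep_eq]))
  have hmid : ∀ (s : Int) (st : γ),
      (PySem.List.pyRange 0 (l_max + 1)).foldl (fun st l1 =>
        if s - l1 < 0 || s - l1 > l_max then st
        else (pvMOrder (min (min l1 (s - l1)) m_max)).foldl (fun st mm =>
          if pvKeep d |mm.1| l1 (s - l1) then w st (l1, mm.1, s - l1, mm.2) else st) st) st
      = ((PySem.List.pyRange 0 (l_max + 1)).flatMap (fun l1 =>
          if s - l1 < 0 || s - l1 > l_max then []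
          else pvCell d l1 (s - l1) (pvMs (min (min l1 (s - l1)) m_max)))).foldl w st := by
    intro s st
    rw [PySem.List.foldl_congr_mem _ _ (fun st l1 =>
        if s - l1 < 0 || s - l1 > l_max then st
        else (pvCell d l1 (s - l1) (pvMs (min (min l1 (s - l1)) m_max))).foldl w st) st
      (by intro st l1 _
          beta_reduce
          by_cases hoob : (s - l1 < 0 || s - l1 > l_max) = true
          · rw [if_pos hoob, if_pos hoob]
          · rw [if_neg hoob, if_neg hoob]; exact hcell s l1 st)]
    exact pv_fold_blocks _ _ _ w st
  rw [PySem.List.foldl_congr_mem _ _ (fun st s =>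
      if hn && (PySem.Int.mod s 2 != 0) then st
      else ((PySem.List.pyRange 0 (l_max + 1)).flatMap (fun l1 =>
        if s - l1 < 0 || s - l1 > l_max then []
        else pvCell d l1 (s - l1) (pvMs (min (min l1 (s - l1)) m_max)))).foldl w st) init
    (by intro st s _
        beta_reduce
        by_cases hsk : (hn && (PySem.Int.mod s 2 != 0)) = true
        · rw [if_pos hsk, if_pos hsk]
        · rw [if_neg hsk, if_neg hsk]; exact hmid s st)]
  exact pv_fold_blocks _ _ _ w init

-- B's flatMap normal form is pvRawB
lemma pvL_eq (l_max m_max : Int) (d : Option (List (Int × Int))) (hn : Bool) :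
    (PySem.List.pyRange 0 (2 * l_max + 1)).flatMap (fun s =>
        if hn && (PySem.Int.mod s 2 != 0) then []
        else (PySem.List.pyRange 0 (l_max + 1)).flatMap (fun l1 =>
          if s - l1 < 0 || s - l1 > l_max then []
          else pvCell d l1 (s - l1) (pvMs (min (min l1 (s - l1)) m_max))))
    = pvRawB l_max m_max d hn := by
  unfold pvRawB
  apply pv_flatMap_congr
  intro s _
  by_cases hsk : (hn && (PySem.Int.mod s 2 != 0)) = true
  · rw [if_pos hsk]
    rw [pv_flatMap_congr (g := fun _ => ([] : List (Int × Int × Int × Int)))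
      (by intro l1 _
          unfold pvG pvFB
          by_cases hoob : (s - l1 < 0 || s - l1 > l_max) = true
          · rw [if_pos hoob]
          · rw [if_neg hoob]
            have hsum : l1 + (s - l1) = s := by ring
            rw [hsum, if_pos hsk])]
    simp
  · rw [if_neg hsk]
    apply pv_flatMap_congr
    intro l1 _
    unfold pvG pvFB
    by_cases hoob : (s - l1 < 0 || s - l1 > l_max) = true
    · rw [if_pos hoob, if_pos hoob]
    · rw [if_neg hoob, if_neg hoob]
      have hsum : l1 + (s - l1) = s := by ring
      rw [hsum, if_neg hsk]

lemma pv_take_set {α : Type} : ∀ (out : List α) (k : Nat) (t : α), k < out.length →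
    (out.set k t).take (k + 1) = out.take k ++ [t] := by
  intro out
  induction out with
  | nil => intro k t h; simp at h
  | cons a rest ih =>
    intro k t h
    cases k with
    | zero => simp
    | succ k' =>
      simp only [List.set_cons_succ, List.take_succ_cons, List.cons_append]
      rw [ih k' t (by simpa using h)]

-- filling the preallocated list slot by slot, in order, writes exactly the emitted list
lemma pv_writeSeq (E : List (Int × Int × Int × Int)) :
    ∀ (k : Nat) (out : List (Int × Int × Int × Int)), out.length = k + E.length →
    (E.foldl (fun st t => (st.1.set st.2.toNat t, st.2 + 1)) (out, (k : Int))).1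
      = out.take k ++ E := by
  induction E with
  | nil =>
    intro k out h
    simp only [List.length_nil, Nat.add_zero] at h
    simp [← h]
  | cons t E ih =>
    intro k out h
    simp only [List.foldl_cons, Int.toNat_natCast]
    rw [show ((k : Int) + 1) = ((k + 1 : Nat) : Int) by push_cast; ring]
    rw [ih (k + 1) (out.set k t) (by simp [h, List.length_cons]; omega)]
    rw [pv_take_set out k t (by simp [h, List.length_cons])]
    simp

-- the two passes of B, with their literal step functions
lemma pvB_count_nf (l_max m_max : Int) (d : Option (List (Int × Int))) (hn : Bool) :
    (PySem.List.pyRange 0 (2 * l_max + 1)).foldl (fun n s =>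
      if hn && (PySem.Int.mod s 2 != 0) then n
      else (PySem.List.pyRange 0 (l_max + 1)).foldl (fun n l1 =>
        if s - l1 < 0 || s - l1 > l_max then n
        else (pvMOrder (min (min l1 (s - l1)) m_max)).foldl (fun n mm =>
          if pvKeep d |mm.1| l1 (s - l1) then n + 1 else n) n) n) (0 : Int)
    = ((PySem.List.pyRange 0 (2 * l_max + 1)).flatMap (fun s =>
        if hn && (PySem.Int.mod s 2 != 0) then []
        else (PySem.List.pyRange 0 (l_max + 1)).flatMap (fun l1 =>
          if s - l1 < 0 || s - l1 > l_max then []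
          else pvCell d l1 (s - l1) (pvMs (min (min l1 (s - l1)) m_max))))).foldl
        (fun n _ => n + 1) (0 : Int) :=
  pvB_loop_nf l_max m_max d hn (fun n _ => n + 1) 0

lemma pvB_fill_nf (l_max m_max : Int) (d : Option (List (Int × Int))) (hn : Bool)
    (init : List (Int × Int × Int × Int) × Int) :
    (PySem.List.pyRange 0 (2 * l_max + 1)).foldl (fun st s =>
      if hn && (PySem.Int.mod s 2 != 0) then st
      else (PySem.List.pyRange 0 (l_max + 1)).foldl (fun st l1 =>
        if s - l1 < 0 || s - l1 > l_max then st
        else (pvMOrder (min (min l1 (s - l1)) m_max)).foldl (fun st mm =>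
          if pvKeep d |mm.1| l1 (s - l1) then
            (st.1.set st.2.toNat (l1, mm.1, s - l1, mm.2), st.2 + 1)
          else st) st) st) init
    = ((PySem.List.pyRange 0 (2 * l_max + 1)).flatMap (fun s =>
        if hn && (PySem.Int.mod s 2 != 0) then []
        else (PySem.List.pyRange 0 (l_max + 1)).flatMap (fun l1 =>
          if s - l1 < 0 || s - l1 > l_max then []
          else pvCell d l1 (s - l1) (pvMs (min (min l1 (s - l1)) m_max))))).foldl
        (fun st t => (st.1.set st.2.toNat t, st.2 + 1)) init :=
  pvB_loop_nf l_max m_max d hn (fun st t => (st.1.set st.2.toNat t, st.2 + 1)) init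

lemma pv_write_all (E out : List (Int × Int × Int × Int)) (h : out.length = E.length) :
    (E.foldl (fun st t => (st.1.set st.2.toNat t, st.2 + 1)) (out, (0 : Int))).1 = E := by
  have h0 : ((0 : Nat) : Int) = (0 : Int) := rfl
  have := pv_writeSeq E 0 out (by simpa using h)
  rw [h0] at this
  simpa using this

lemma pvB_nf (l_max m_max : Int) (d : Option (List (Int × Int))) (hn : Bool) :
    channel_list_extended_py_alt l_max m_max d hn = pvRawB l_max m_max d hn := by
  unfold channel_list_extended_py_alt
  rw [pvB_count_nf, pvB_fill_nf, pvL_eq, pv_foldl_add_one]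
  rw [show ((0 : Int) + ((pvRawB l_max m_max d hn).length : Int)).toNat
      = (pvRawB l_max m_max d hn).length by omega]
  exact pv_write_all _ _ (by simp)

-- B's m1 order is a permutation of A's
lemma pvMs_perm (n : Int) : (pvMs n).Perm (PySem.List.pyRange (-n) (n + 1)) := by
  rcases Int.lt_or_le n 0 with h | h
  · unfold pvMs
    rw [PySem.List.pyRange_one_eq_nil (by omega), PySem.List.pyRange_one_eq_nil (by omega)]
    simp
  · induction n, h using Int.le_induction with
    | base => decide
    | succ n hn ih =>
      have hL : pvMs (n + 1) = pvMs n ++ [-(n + 1), n + 1] := by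
        unfold pvMs
        rw [PySem.List.pyRange_one_succ_right (a := 0) (b := n + 1) (by omega),
          List.flatMap_append]
        have hne : ¬ ((n + 1 : Int) = 0) := by omega
        simp [hne]
      have hR : PySem.List.pyRange (-(n + 1)) (n + 1 + 1)
          = (-(n + 1)) :: (PySem.List.pyRange (-n) (n + 1) ++ [n + 1]) := by
        rw [PySem.List.pyRange_one_cons (by omega)]
        rw [show (-(n + 1) + 1 : Int) = -n by ring]
        rw [PySem.List.pyRange_one_succ_right (by omega : -(n : Int) ≤ n + 1)]
      rw [hL, hR]
      exact List.Perm.trans List.perm_middle (List.Perm.cons _ (ih.append_right _))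

lemma pvMs_pairwise (n : Int) :
    (pvMs n).Pairwise (fun a b => |a| < |b| ∨ (|a| = |b| ∧ a < b)) := by
  have habs : ∀ k : Int, 0 ≤ k → ∀ x ∈ (if k == 0 then [(0 : Int)] else [-k, k]), |x| = k := by
    intro k hk x hx
    by_cases h0 : k = 0
    · subst h0; simp at hx; simp [hx]
    · have : (k == 0) = false := by simp [h0]
      rw [this] at hx
      simp at hx
      rcases hx with rfl | rfl
      · simp [abs_of_nonneg hk]
      · simp [abs_of_nonneg hk]
  unfold pvMs
  rw [List.pairwise_flatMap]
  constructor
  · intro k hk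
    have hk0 : 0 ≤ k := (PySem.List.mem_pyRange_one.mp hk).1
    by_cases h0 : k = 0
    · subst h0; simp
    · have : (k == 0) = false := by simp [h0]
      rw [this]
      rw [if_neg (by simp)]
      refine List.Pairwise.cons ?_ (by simp)
      intro y hy
      simp at hy
      subst hy
      right
      constructor
      · simp
      · omega
  · have hp := PySem.List.pairwise_lt_pyRange_one 0 (n + 1)
    refine hp.imp_of_mem ?_
    intro k1 k2 h1 h2 hlt x hx y hy
    have e1 := habs k1 (PySem.List.mem_pyRange_one.mp h1).1 x hx
    have e2 := habs k2 (PySem.List.mem_pyRange_one.mp h2).1 y hy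
    left
    omega

-- permutation of the two raw lists
lemma pvRaw_perm (l_max m_max : Int) (d : Option (List (Int × Int))) (hn : Bool) :
    (pvRawB l_max m_max d hn).Perm (pvRawA l_max m_max d hn) := by
  unfold pvRawB pvRawA
  have hswap : ((PySem.List.pyRange 0 (2 * l_max + 1)).flatMap (fun s =>
        (PySem.List.pyRange 0 (l_max + 1)).flatMap (fun l1 => pvG l_max m_max d hn s l1))).Perm
      ((PySem.List.pyRange 0 (l_max + 1)).flatMap (fun l1 =>
        (PySem.List.pyRange 0 (2 * l_max + 1)).flatMap (fun s => pvG l_max m_max d hn s l1))) := by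
    rw [← Multiset.coe_eq_coe]
    simp only [← Multiset.coe_bind]
    exact Multiset.bind_bind _ _
  refine hswap.trans ?_
  apply pv_perm_flatMap
  intro l1 hl1
  obtain ⟨hl1a, hl1b⟩ := PySem.List.mem_pyRange_one.mp hl1
  have hsplit : PySem.List.pyRange 0 (2 * l_max + 1)
      = PySem.List.pyRange 0 l1 ++ (PySem.List.pyRange l1 (l1 + l_max + 1)
        ++ PySem.List.pyRange (l1 + l_max + 1) (2 * l_max + 1)) := by
    rw [PySem.List.pyRange_one_append 0 l1 (2 * l_max + 1) (by omega) (by omega),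
      PySem.List.pyRange_one_append l1 (l1 + l_max + 1) (2 * l_max + 1) (by omega) (by omega)]
  rw [hsplit, List.flatMap_append, List.flatMap_append]
  have h1 : (PySem.List.pyRange 0 l1).flatMap (fun s => pvG l_max m_max d hn s l1) = [] := by
    rw [pv_flatMap_congr (g := fun _ => ([] : List (Int × Int × Int × Int)))
      (by intro s hs
          obtain ⟨hs1, hs2⟩ := PySem.List.mem_pyRange_one.mp hs
          unfold pvG
          rw [if_pos (by simp; omega)])]
    simp
  have h3 : (PySem.List.pyRange (l1 + l_max + 1) (2 * l_max + 1)).flatMap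
      (fun s => pvG l_max m_max d hn s l1) = [] := by
    rw [pv_flatMap_congr (g := fun _ => ([] : List (Int × Int × Int × Int)))
      (by intro s hs
          obtain ⟨hs1, hs2⟩ := PySem.List.mem_pyRange_one.mp hs
          unfold pvG
          rw [if_pos (by simp; omega)])]
    simp
  rw [h1, h3]
  simp only [List.nil_append, List.append_nil]
  have h2 : (PySem.List.pyRange l1 (l1 + l_max + 1)).flatMap (fun s => pvG l_max m_max d hn s l1)
      = (PySem.List.pyRange 0 (l_max + 1)).flatMap (fun l2 => pvFB d m_max hn l1 l2) := by
    rw [PySem.List.pyRange_one l1 (l1 + l_max + 1), PySem.List.pyRange_one 0 (l_max + 1),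
      List.flatMap_map, List.flatMap_map]
    rw [show (l1 + l_max + 1 - l1) = (l_max + 1 - 0) by ring]
    apply pv_flatMap_congr
    intro k hk
    have hk' : (k : Int) ≤ l_max := by
      have := List.mem_range.mp hk
      omega
    unfold pvG
    rw [if_neg (by simp; omega)]
    rw [show (l1 + (k : Int) - l1) = 0 + (k : Int) by ring]
  rw [h2]
  apply pv_perm_flatMap
  intro l2 _
  unfold pvFB pvF
  by_cases hpar : (hn && (PySem.Int.mod (l1 + l2) 2 != 0)) = true
  · rw [if_pos hpar, if_pos hpar]
  · rw [if_neg hpar, if_neg hpar]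
    unfold pvCell
    exact ((pvMs_perm (min (min l1 l2) m_max)).filter _).map _

-- B's raw list is strictly increasing under the sort key
lemma pvRawB_pairwise (l_max m_max : Int) (d : Option (List (Int × Int))) (hn : Bool) :
    (pvRawB l_max m_max d hn).Pairwise (fun a b => pvKey a < pvKey b) := by
  have key_fst : ∀ s l1 m : Int, pvKey (l1, m, s - l1, -m)
      = toLex (s, toLex (l1, toLex (|m|, m))) := by
    intro s l1 m
    have h : pvKey (l1, m, s - l1, -m) = toLex (l1 + (s - l1), toLex (l1, toLex (|m|, m))) := rfl
    rw [h, show l1 + (s - l1) = s from by ring]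
  have mem_pvG : ∀ {s l1 : Int} {x : Int × Int × Int × Int},
      x ∈ pvG l_max m_max d hn s l1 → ∃ mm : Int, x = (l1, mm, s - l1, -mm) := by
    intro s l1 x hx
    unfold pvG at hx
    split at hx
    · simp at hx
    · unfold pvFB at hx
      split at hx
      · simp at hx
      · unfold pvCell at hx
        simp only [List.mem_map, List.mem_filter] at hx
        obtain ⟨mm, _, rfl⟩ := hx
        exact ⟨mm, rfl⟩
  unfold pvRawB
  rw [List.pairwise_flatMap]
  constructor
  · intro s _
    rw [List.pairwise_flatMap]
    constructor
    · intro l1 _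
      unfold pvG
      split
      · simp
      · unfold pvFB
        split
        · simp
        · unfold pvCell
          rw [List.pairwise_map]
          refine List.Pairwise.imp ?_ (((pvMs_pairwise _).filter _))
          intro a b hab
          have ea : pvKey (l1, a, s - l1, -a) = toLex (s, toLex (l1, toLex (|a|, a))) :=
            key_fst s l1 a
          have eb : pvKey (l1, b, s - l1, -b) = toLex (s, toLex (l1, toLex (|b|, b))) :=
            key_fst s l1 b
          rw [ea, eb]
          exact Prod.Lex.toLex_lt_toLex.mpr (Or.inr ⟨rfl,
            Prod.Lex.toLex_lt_toLex.mpr (Or.inr ⟨rfl, Prod.Lex.toLex_lt_toLex.mpr hab⟩)⟩)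
    · refine (PySem.List.pairwise_lt_pyRange_one 0 (l_max + 1)).imp ?_
      intro l1 l1' hlt x hx y hy
      obtain ⟨ma, rfl⟩ := mem_pvG hx
      obtain ⟨mb, rfl⟩ := mem_pvG hy
      rw [key_fst, key_fst]
      exact Prod.Lex.toLex_lt_toLex.mpr (Or.inr ⟨rfl,
        Prod.Lex.toLex_lt_toLex.mpr (Or.inl hlt)⟩)
  · refine (PySem.List.pairwise_lt_pyRange_one 0 (2 * l_max + 1)).imp ?_
    intro s s' hlt x hx y hy
    obtain ⟨l1, _, hx'⟩ := List.mem_flatMap.mp hx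
    obtain ⟨l1', _, hy'⟩ := List.mem_flatMap.mp hy
    obtain ⟨ma, rfl⟩ := mem_pvG hx'
    obtain ⟨mb, rfl⟩ := mem_pvG hy'
    rw [key_fst, key_fst]
    exact Prod.Lex.toLex_lt_toLex.mpr (Or.inl hlt)

-- ===== VERDICT (by name: the statement is the Claim_ definition above) =====
theorem channel_list_extended_py_spec : Claim_equal_channel_list_extended_py := by
  intro l_max m_max d hn _
  unfold Spec_channel_list_extended_py
  rw [pvA_nf, pvB_nf,
    PySem.List.sorted_eq_of_perm_of_pairwise_lt _ _ pvKey (pvRaw_perm l_max m_max d hn)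
      (pvRawB_pairwise l_max m_max d hn)]
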